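-- pv_equiv track=rewrite | github.com/RedHatQE/openshift-python-wrapper | test_utils/fake_dynamic_client.py | _filter_by_fields
-- ===== SOURCE A (Python) =====
-- def _filter_by_fields(resources, field_selector):
--     """Filter resources by field selector"""
--     if not field_selector:
--         return resources
--
--     # Parse field selector (simple implementation)
--     # Supports: metadata.name=value, metadata.namespace=value
--     selectors = []
--     for selector in field_selector.split(","):
--         selector = selector.strip()
--         if "=" in selector and "!=" not in selector:
--             key, value = selector.split("=", 1)
--             selectors.append(("eq", key.strip(), value.strip()))
--         elif "!=" in selector:
--             key, value = selector.split("!=", 1)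
--             selectors.append(("ne", key.strip(), value.strip()))
--
--     filtered_resources = []
--     for resource in resources:
--         match = True
--
--         for op, key, value in selectors:
--             # Simple field access
--             field_value = None
--             if key == "metadata.name":
--                 field_value = resource.get("metadata", {}).get("name")
--             elif key == "metadata.namespace":
--                 field_value = resource.get("metadata", {}).get("namespace")
--             # Add more field paths as needed
--
--             if op == "eq":
--                 if field_value != value:
--                     match = False
--                     break
--             elif op == "ne":
--                 if field_value == value:
--                     match = False
--                     break
--
--         if match:
--             filtered_resources.append(resource)
--
--     return filtered_resources
-- ===== SOURCE B (Python) =====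
-- def _parse_selector(selector):
--     selector = selector.strip()
--     if "!=" in selector:
--         key, value = selector.split("!=", 1)
--         return ("ne", key.strip(), value.strip())
--     if "=" in selector:
--         key, value = selector.split("=", 1)
--         return ("eq", key.strip(), value.strip())
--     return None
--
--
-- def _matches(resource, op, key, value):
--     if key == "metadata.name":
--         field_value = resource.get("metadata", {}).get("name")
--     elif key == "metadata.namespace":
--         field_value = resource.get("metadata", {}).get("namespace")
--     else:
--         field_value = None
--     return (field_value == value) if op == "eq" else (field_value != value)
--
--
-- def _filter_by_fields(resources, field_selector):
--     """Filter resources by field selector (sequential per-selector filtering)"""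
--     if not field_selector:
--         return resources
--
--     selectors = [p for p in map(_parse_selector, field_selector.split(",")) if p is not None]
--
--     result = list(resources)
--     for op, key, value in selectors:
--         result = [r for r in result if _matches(r, op, key, value)]
--     return result
-- ===== Notes on version B (the rewrite author's own statement) =====
-- stated objective: alternative
-- what changed: B parses selectors with a branch-reordered map+filter helper and then filters the resource list once per selector (sequential filtering) instead of A's loop over resources with an inner break-on-failure scan of all selectors.
import Mathlib
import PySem

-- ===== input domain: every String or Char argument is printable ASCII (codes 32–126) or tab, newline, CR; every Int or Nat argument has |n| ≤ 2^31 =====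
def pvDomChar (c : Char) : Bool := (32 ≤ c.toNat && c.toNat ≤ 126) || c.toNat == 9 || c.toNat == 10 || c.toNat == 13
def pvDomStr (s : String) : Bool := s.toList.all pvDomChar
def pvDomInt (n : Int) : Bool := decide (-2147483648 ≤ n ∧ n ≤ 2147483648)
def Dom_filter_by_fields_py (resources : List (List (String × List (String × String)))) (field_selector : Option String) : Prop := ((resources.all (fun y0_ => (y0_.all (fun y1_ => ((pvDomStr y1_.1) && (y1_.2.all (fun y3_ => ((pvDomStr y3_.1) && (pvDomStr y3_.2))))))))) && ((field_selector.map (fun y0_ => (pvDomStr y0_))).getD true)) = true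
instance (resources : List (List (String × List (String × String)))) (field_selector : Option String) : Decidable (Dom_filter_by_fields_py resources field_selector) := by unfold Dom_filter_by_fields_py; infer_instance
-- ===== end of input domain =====

-- B replaces A's resource loop with an inner selector scan by sequential per-selector
-- filtering (one filter pass per parsed selector) and a branch-reordered selector parser
-- via map+filter; alternative decomposition, same behaviour.


-- ===== PORT B: helpers =====
-- (defined before port A so that no compiler-generated match auxiliary is shared between the two ports)
-- _parse_selector: strip, '!=' first, then '=', else None
def pvParseSelector (selector : String) : Option (String × String × String) :=
  let selector := PySem.Str.strip selector
  if PySem.Str.isIn "!=" selector then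
    match (PySem.Str.splitMax? selector "!=" 1).getD [] with
    | [key, value] => some ("ne", PySem.Str.strip key, PySem.Str.strip value)
    | _ => none   -- unreachable: '!=' in selector gives exactly two pieces
  else if PySem.Str.isIn "=" selector then
    match (PySem.Str.splitMax? selector "=" 1).getD [] with
    | [key, value] => some ("eq", PySem.Str.strip key, PySem.Str.strip value)
    | _ => none   -- unreachable: '=' in selector gives exactly two pieces
  else none

-- _matches: extract the field value, then compare by op
def pvMatches (resource : List (String × List (String × String))) (op key value : String) : Bool :=
  let field_value : Option String :=
    if key == "metadata.name" then
      (PySem.Dict.mk ((PySem.Dict.mk resource).getD "metadata" [])).get? "name"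
    else if key == "metadata.namespace" then
      (PySem.Dict.mk ((PySem.Dict.mk resource).getD "metadata" [])).get? "namespace"
    else none
  if op == "eq" then field_value == some value else field_value != some value


-- ===== PORT A =====
-- field_value: None, then set for "metadata.name" / "metadata.namespace" (A's if/elif)
def pvFieldValueA (resource : List (String × List (String × String))) (key : String) : Option String :=
  if key == "metadata.name" then
    (PySem.Dict.mk ((PySem.Dict.mk resource).getD "metadata" [])).get? "name"
  else if key == "metadata.namespace" then
    (PySem.Dict.mk ((PySem.Dict.mk resource).getD "metadata" [])).get? "namespace"
  else none

-- A's inner 'for op, key, value in selectors' loop with break: match stays True iff no selector fails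
def pvCheckA (resource : List (String × List (String × String))) :
    List (String × String × String) → Bool
  | [] => true
  | (op, key, value) :: rest =>
    let field_value := pvFieldValueA resource key
    if op == "eq" then
      if field_value != some value then false else pvCheckA resource rest
    else if op == "ne" then
      if field_value == some value then false else pvCheckA resource rest
    else pvCheckA resource rest

def filter_by_fields_py (resources : List (List (String × List (String × String)))) (field_selector : Option String) : List (List (String × List (String × String))) :=
  match field_selector with
  | none => resources
  | some fs =>
    if fs == "" then resources
    else
      let selectors : List (String × String × String) :=
        ((PySem.Str.split? fs ",").getD []).foldl (fun sels selector =>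
          let selector := PySem.Str.strip selector
          if PySem.Str.isIn "=" selector && !(PySem.Str.isIn "!=" selector) then
            match (PySem.Str.splitMax? selector "=" 1).getD [] with
            | [key, value] => sels ++ [("eq", PySem.Str.strip key, PySem.Str.strip value)]
            | _ => sels   -- unreachable: '=' in selector gives exactly two pieces
          else if PySem.Str.isIn "!=" selector then
            match (PySem.Str.splitMax? selector "!=" 1).getD [] with
            | [key, value] => sels ++ [("ne", PySem.Str.strip key, PySem.Str.strip value)]
            | _ => sels   -- unreachable: '!=' in selector gives exactly two pieces
          else sels) []
      resources.foldl (fun filtered_resources resource =>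
        if pvCheckA resource selectors then filtered_resources ++ [resource]
        else filtered_resources) []

-- ===== PORT B =====
def filter_by_fields_py_alt (resources : List (List (String × List (String × String)))) (field_selector : Option String) : List (List (String × List (String × String))) :=
  -- 'if not field_selector: return resources' — falsy iff None or ""
  let fs := field_selector.getD ""
  if fs == "" then resources
  else
    let selectors := (((PySem.Str.split? fs ",").getD []).map pvParseSelector).filterMap id
    selectors.foldl (fun result t =>
      result.filter (fun r => pvMatches r t.1 t.2.1 t.2.2)) resources

-- ===== PRECONDITION & SPEC =====
def Spec_filter_by_fields_py (resources : List (List (String × List (String × String)))) (field_selector : Option String) (out : List (List (String × List (String × String)))) : Prop := out = filter_by_fields_py_alt resources field_selector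
instance (resources : List (List (String × List (String × String)))) (field_selector : Option String) (out : List (List (String × List (String × String)))) : Decidable (Spec_filter_by_fields_py resources field_selector out) := by unfold Spec_filter_by_fields_py; infer_instance

-- ===== CLAIM (what is proved, stated in full; the proofs are below) =====
def Claim_equal_filter_by_fields_py : Prop := ∀ (resources : List (List (String × List (String × String)))) (field_selector : Option String), Dom_filter_by_fields_py resources field_selector → Spec_filter_by_fields_py resources field_selector (filter_by_fields_py resources field_selector)

-- ===== LEMMAS AND PROOFS =====

-- A's parsing step appends exactly the element pvParseSelector yields
theorem pvParseStep_eq (sels : List (String × String × String)) (selector : String) :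
    (let selector := PySem.Str.strip selector
     if PySem.Str.isIn "=" selector && !(PySem.Str.isIn "!=" selector) then
        match (PySem.Str.splitMax? selector "=" 1).getD [] with
        | [key, value] => sels ++ [("eq", PySem.Str.strip key, PySem.Str.strip value)]
        | _ => sels
      else if PySem.Str.isIn "!=" selector then
        match (PySem.Str.splitMax? selector "!=" 1).getD [] with
        | [key, value] => sels ++ [("ne", PySem.Str.strip key, PySem.Str.strip value)]
        | _ => sels
      else sels)
    = sels ++ (pvParseSelector selector).toList := by
  simp only [pvParseSelector]
  cases h1 : PySem.Str.isIn "!=" (PySem.Str.strip selector) with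
  | true =>
    simp only [Bool.not_true, Bool.and_false, Bool.false_eq_true, if_false, if_true]
    cases (PySem.Str.splitMax? (PySem.Str.strip selector) "!=" 1).getD [] with
    | nil => simp
    | cons a l => cases l with
      | nil => simp
      | cons b l' => cases l' <;> simp
  | false =>
    simp only [Bool.not_false, Bool.and_true, Bool.false_eq_true, if_false]
    cases h2 : PySem.Str.isIn "=" (PySem.Str.strip selector) with
    | true =>
      simp only [if_true]
      cases (PySem.Str.splitMax? (PySem.Str.strip selector) "=" 1).getD [] with
      | nil => simp
      | cons a l => cases l with
        | nil => simp
        | cons b l' => cases l' <;> simp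
    | false =>
      simp

-- the generic foldl-append form of a filterMap
theorem pvFoldl_append_toList {α β : Type} (f : α → Option β) (l : List α) (acc : List β) :
    l.foldl (fun acc x => acc ++ (f x).toList) acc = acc ++ (l.map f).filterMap id := by
  induction l generalizing acc with
  | nil => simp
  | cons x xs ih =>
    simp only [List.foldl_cons, List.map_cons, List.filterMap_cons, ih]
    cases f x <;> simp

-- every parsed selector's op is "eq" or "ne"
theorem pvParse_op (selector : String) (t : String × String × String)
    (h : pvParseSelector selector = some t) : t.1 = "eq" ∨ t.1 = "ne" := by
  simp only [pvParseSelector] at h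
  split at h
  · split at h
    · cases h; exact Or.inr rfl
    · exact absurd h (by simp)
  · split at h
    · split at h
      · cases h; exact Or.inl rfl
      · exact absurd h (by simp)
    · exact absurd h (by simp)

-- A's break-loop equals 'all selectors match' (pvMatches), for op ∈ {eq, ne}
theorem pvCheckA_eq_all (resource : List (String × List (String × String)))
    (sels : List (String × String × String))
    (hops : ∀ t ∈ sels, t.1 = "eq" ∨ t.1 = "ne") :
    pvCheckA resource sels = sels.all (fun t => pvMatches resource t.1 t.2.1 t.2.2) := by
  induction sels with
  | nil => rfl
  | cons t rest ih =>
    obtain ⟨op, key, value⟩ := t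
    have hop := hops _ (List.mem_cons_self ..)
    have ihr := ih (fun t ht => hops t (List.mem_cons_of_mem _ ht))
    rcases hop with h | h <;> simp only at h <;> subst h <;>
      simp only [pvCheckA, pvMatches, List.all_cons, ihr] <;>
      cases hfv : (pvFieldValueA resource key == some value) <;>
        simp_all [pvFieldValueA, bne]
-- (the per-selector test is the same extraction and comparison on both sides)

-- sequential filtering by each selector equals one filter by the conjunction
theorem pvFoldl_filter_eq {α β : Type} (l : List β) (p : β → α → Bool) (res : List α) :
    l.foldl (fun result t => result.filter (p t)) res
      = res.filter (fun r => l.all (fun t => p t r)) := by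
  induction l generalizing res with
  | nil => simp
  | cons t rest ih => simp [ih, List.filter_filter, Bool.and_comm]

-- ===== VERDICT (by name: the statement is the Claim_ definition above) =====
theorem filter_by_fields_py_spec : Claim_equal_filter_by_fields_py := by
  intro resources field_selector _
  unfold Spec_filter_by_fields_py filter_by_fields_py filter_by_fields_py_alt
  cases field_selector with
  | none => rfl
  | some fs =>
    simp only [Option.getD_some]
    by_cases hfs : fs == ""
    · simp [hfs]
    · simp only [hfs, Bool.false_eq_true, if_false]
      have hstep : (fun (sels : List (String × String × String)) (selector : String) =>
          let selector := PySem.Str.strip selector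
          if PySem.Str.isIn "=" selector && !(PySem.Str.isIn "!=" selector) then
            match (PySem.Str.splitMax? selector "=" 1).getD [] with
            | [key, value] => sels ++ [("eq", PySem.Str.strip key, PySem.Str.strip value)]
            | _ => sels
          else if PySem.Str.isIn "!=" selector then
            match (PySem.Str.splitMax? selector "!=" 1).getD [] with
            | [key, value] => sels ++ [("ne", PySem.Str.strip key, PySem.Str.strip value)]
            | _ => sels
          else sels)
          = (fun sels selector => sels ++ (pvParseSelector selector).toList) :=
        funext fun sels => funext fun selector => pvParseStep_eq sels selector
      rw [hstep, pvFoldl_append_toList]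
      set sels := ((((PySem.Str.split? fs ",").getD []).map pvParseSelector).filterMap id) with hsels
      have hops : ∀ t ∈ sels, t.1 = "eq" ∨ t.1 = "ne" := by
        intro t ht
        rw [hsels] at ht
        simp only [List.mem_filterMap, List.mem_map, id] at ht
        obtain ⟨o, ⟨s', _, rfl⟩, hid⟩ := ht
        exact pvParse_op s' t hid
      rw [pvFoldl_filter_eq, PySem.List.foldl_append_if]
      simpa using List.filter_congr (fun r _ => pvCheckA_eq_all r sels hops)
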